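-- pv_equiv track=rewrite | github.com/arumajirou/loto | ds/src/anomalies/pypots/naming.py | sanitize_token
-- ===== SOURCE A (Python) =====
-- def sanitize_token(s: str) -> str:
--     """Make a token safe for use in SQL column names.
--
--     - Keep alnum and underscore.
--     - Replace other chars with underscore.
--     """
--     out = []
--     for ch in str(s):
--         if ch.isalnum() or ch == "_":
--             out.append(ch)
--         else:
--             out.append("_")
--     # collapse multiple underscores
--     token = "".join(out)
--     while "__" in token:
--         token = token.replace("__", "_")
--     return token.strip("_")
-- ===== SOURCE B (Python) =====
-- def sanitize_token(s: str) -> str: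
--     """Make a token safe for use in SQL column names.
--
--     Single pass: collect maximal runs of alphanumeric characters (every
--     non-alnum character, including '_', acts as a separator) and join the
--     runs with single underscores.
--     """
--     runs = []
--     cur = []
--     for ch in str(s):
--         if ch.isalnum():
--             cur.append(ch)
--         elif cur:
--             runs.append("".join(cur))
--             cur = []
--     if cur:
--         runs.append("".join(cur))
--     return "_".join(runs)
-- ===== Notes on version B (the rewrite author's own statement) =====
-- stated objective: alternative
-- what changed: Replaced the per-char mapping plus the repeated whole-string double-underscore collapse loop and final strip by a single pass that segments the string into maximal alnum runs and joins them with single underscores.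
import Mathlib
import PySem

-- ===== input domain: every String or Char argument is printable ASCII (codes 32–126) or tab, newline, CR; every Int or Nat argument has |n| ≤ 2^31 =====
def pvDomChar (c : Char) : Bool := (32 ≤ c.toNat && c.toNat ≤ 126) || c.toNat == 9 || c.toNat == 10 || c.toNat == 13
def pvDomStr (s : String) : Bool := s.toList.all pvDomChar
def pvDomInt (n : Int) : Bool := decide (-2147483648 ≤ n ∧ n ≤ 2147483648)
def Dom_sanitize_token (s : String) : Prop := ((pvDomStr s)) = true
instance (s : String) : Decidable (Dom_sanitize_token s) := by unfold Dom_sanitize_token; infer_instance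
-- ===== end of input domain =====

-- B replaces A's char-map + repeated '__'->'_' replace loop + strip by a single pass that
-- collects maximal alnum runs and joins them with '_' (objective: alternative single-pass algorithm).

-- ===== PORT A =====
-- Termination helpers for A's `while "__" in token:` loop: a structural model of
-- token.replace("__","_") used ONLY to show each iteration shrinks the string.
def pvRep : List Char → List Char
  | [] => []
  | [c] => [c]
  | a :: b :: r => if a = '_' ∧ b = '_' then '_' :: pvRep r else a :: pvRep (b :: r)

theorem pvRep_length_le (cs : List Char) : (pvRep cs).length ≤ cs.length := by
  induction cs using pvRep.induct with
  | case1 => simp [pvRep]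
  | case2 c => simp [pvRep]
  | case3 a b r hab ih => simp [pvRep, hab]; omega
  | case4 a b r hab ih => simp [pvRep, hab]; simp at ih; omega

theorem pvGo (fuel : Nat) : ∀ (l acc : List Char), l.length ≤ fuel →
    PySem.Chars.replace.go ['_','_'] ['_'] fuel l acc = acc.reverse ++ pvRep l := by
  induction fuel with
  | zero =>
    intro l acc hl
    have : l = [] := by cases l <;> simp_all
    subst this
    rw [PySem.Chars.replace.go]
    simp [pvRep]
  | succ f ih =>
    intro l acc hl
    match l with
    | [] =>
      rw [PySem.Chars.replace.go]
      simp [pvRep]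
      omega
    | [c] =>
      rw [PySem.Chars.replace.go]
      have hpre : (['_','_'].isPrefixOf [c]) = false := by simp [List.isPrefixOf]
      simp only [hpre, Bool.false_eq_true, if_false]
      rw [ih [] (c :: acc) (by simp)]
      simp [pvRep]
    | c :: b :: t =>
      rw [PySem.Chars.replace.go]
      by_cases hc : c = '_' ∧ b = '_'
      · obtain ⟨hc1, hc2⟩ := hc
        subst hc1; subst hc2
        have hpre : (['_','_'].isPrefixOf ('_' :: '_' :: t)) = true := by
          simp [List.isPrefixOf]
        simp only [hpre, if_true]
        rw [show (['_','_'] : List Char).length = 2 from rfl]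
        simp only [List.drop_succ_cons, List.drop_zero]
        have hacc : (['_'] : List Char).reverse ++ acc = '_' :: acc := by simp
        rw [hacc, ih t (('_' : Char) :: acc) (by simp at hl ⊢; omega)]
        simp [pvRep]
      · have hpre : (['_','_'].isPrefixOf (c :: b :: t)) = false := by
          simp [List.isPrefixOf]
          intro h1 h2
          exact absurd ⟨h1.symm, h2.symm⟩ hc
        simp only [hpre, Bool.false_eq_true, if_false]
        rw [ih (b :: t) (c :: acc) (by simp at hl ⊢; omega)]
        simp [pvRep, hc]

theorem pvReplace_eq_pvRep (cs : List Char) :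
    PySem.Chars.replace cs ['_','_'] ['_'] = pvRep cs := by
  have h := pvGo cs.length cs [] le_rfl
  simpa [PySem.Chars.replace] using h

theorem pvRep_length_lt : ∀ (cs : List Char), ['_','_'] <:+: cs →
    (pvRep cs).length < cs.length := by
  intro cs
  induction cs using pvRep.induct with
  | case1 => intro h; simp at h
  | case2 c =>
    intro hin
    have := hin.length_le
    simp at this
  | case3 a b r hab ih =>
    intro _
    have hle := pvRep_length_le r
    simp [pvRep, hab]
    omega
  | case4 a b r hab ih =>
    intro h
    rcases List.infix_cons_iff.mp h with hpre | hinf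
    · rcases hpre with ⟨t2, ht⟩
      injection ht with h1 ht'
      injection ht' with h2 _
      exact absurd ⟨h1.symm, h2.symm⟩ hab
    · have hlt := ih hinf
      simp [pvRep, hab]
      simp at hlt
      omega

theorem pvReplace_length_lt (cs : List Char) (h : PySem.Chars.isIn ['_','_'] cs = true) :
    (PySem.Chars.replace cs ['_','_'] ['_']).length < cs.length := by
  rw [pvReplace_eq_pvRep]
  exact pvRep_length_lt cs ((PySem.Chars.isIn_iff_infix _ _).mp h)

-- `while "__" in token: token = token.replace("__", "_")` (on code points; PySem.Str.isIn /
-- PySem.Str.replace are these Chars functions on s.toList by definition)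
def pvCollapseLoop (t : List Char) : List Char :=
  if h : PySem.Chars.isIn ['_','_'] t = true then
    pvCollapseLoop (PySem.Chars.replace t ['_','_'] ['_'])
  else t
  termination_by t.length
  decreasing_by exact pvReplace_length_lt t h

def sanitize_token (s : String) : String :=
  -- out = []; for ch in str(s): out.append(ch if ch.isalnum() or ch == "_" else "_")
  let out : List Char :=
    s.toList.foldl (fun acc ch =>
      acc ++ [if PySem.Chars.isalnum ch || ch == '_' then ch else '_']) []
  -- token = "".join(out); while "__" in token: token = token.replace("__", "_")
  let token := pvCollapseLoop out
  -- return token.strip("_")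
  String.ofList (PySem.Chars.stripChars token ['_'])

-- ===== PORT B =====
-- runs/cur accumulator loop of Source B, then final flush of cur
def pvRunsLoop : List Char → List (List Char) → List Char → List (List Char)
  | [], runs, cur => if cur.isEmpty then runs else runs ++ [cur]
  | c :: rest, runs, cur =>
    if PySem.Chars.isalnum c then pvRunsLoop rest runs (cur ++ [c])
    else if cur.isEmpty then pvRunsLoop rest runs cur
    else pvRunsLoop rest (runs ++ [cur]) []

def sanitize_token_alt (s : String) : String :=
  -- return "_".join(runs)
  String.ofList (PySem.Chars.join ['_'] (pvRunsLoop s.toList [] []))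

-- ===== PRECONDITION & SPEC =====
def Spec_sanitize_token (s : String) (out : String) : Prop := out = sanitize_token_alt s
instance (s : String) (out : String) : Decidable (Spec_sanitize_token s out) := by unfold Spec_sanitize_token; infer_instance

-- ===== CLAIM (what is proved, stated in full; the proofs are below) =====
def Claim_equal_sanitize_token : Prop := ∀ (s : String), Dom_sanitize_token s → Spec_sanitize_token s (sanitize_token s)

-- ===== LEMMAS AND PROOFS =====

-- A's kept-or-underscore character map
def pvF (ch : Char) : Char := if PySem.Chars.isalnum ch || ch == '_' then ch else '_'

-- adjacent-duplicate-underscore collapse: the fixpoint A's while-loop reaches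
def pvCollapse : List Char → List Char
  | [] => []
  | [c] => [c]
  | a :: b :: r => if a = '_' ∧ b = '_' then pvCollapse (b :: r) else a :: pvCollapse (b :: r)

def pvP : Char → Bool := fun c => (['_'] : List Char).contains c

-- right strip of '_' characters, as inside PySem.Chars.stripChars
def pvRstrip (y : List Char) : List Char := (List.dropWhile pvP y.reverse).reverse

theorem pvStripChars_eq (cs : List Char) :
    PySem.Chars.stripChars cs ['_'] = pvRstrip (List.dropWhile pvP cs) := rfl

theorem pvP_underscore : pvP '_' = true := by decide

theorem pvP_false {a : Char} (h : a ≠ '_') : pvP a = false := by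
  simp [pvP]
  exact h

theorem isalnum_underscore : PySem.Chars.isalnum '_' = false := by decide

theorem pvF_alnum {c : Char} (h : PySem.Chars.isalnum c = true) : pvF c = c := by
  simp [pvF, h]

theorem pvF_not_alnum {c : Char} (h : PySem.Chars.isalnum c = false) : pvF c = '_' := by
  by_cases hc : c = '_' <;> simp [pvF, h, hc]

theorem isalnum_pvF (c : Char) : PySem.Chars.isalnum (pvF c) = PySem.Chars.isalnum c := by
  by_cases h : PySem.Chars.isalnum c = true
  · rw [pvF_alnum h]
  · rw [pvF_not_alnum (by simpa using h), isalnum_underscore]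
    simp_all

-- characters an A-mapped string can contain
def pvShape (cs : List Char) : Prop := ∀ c ∈ cs, PySem.Chars.isalnum c = true ∨ c = '_'

theorem pvShape_map_pvF (cs : List Char) : pvShape (cs.map pvF) := by
  intro c hc
  rcases List.mem_map.mp hc with ⟨x, _, rfl⟩
  by_cases h : PySem.Chars.isalnum x = true
  · exact Or.inl (by rw [pvF_alnum h]; exact h)
  · exact Or.inr (pvF_not_alnum (by simpa using h))

theorem pvCollapse_cons_ne {a : Char} (h : a ≠ '_') (x : List Char) :
    pvCollapse (a :: x) = a :: pvCollapse x := by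
  cases x <;> simp [pvCollapse, h]

theorem pvCollapse_uu (x : List Char) :
    pvCollapse ('_' :: '_' :: x) = pvCollapse ('_' :: x) := by
  simp [pvCollapse]

theorem pvCollapse_of_not_infix : ∀ (cs : List Char), ¬ (['_','_'] <:+: cs) → pvCollapse cs = cs := by
  intro cs
  induction cs using pvCollapse.induct with
  | case1 => intro _; rfl
  | case2 c => intro _; rfl
  | case3 a b r hab ih =>
    intro h
    exfalso
    apply h
    obtain ⟨h1, h2⟩ := hab
    subst h1; subst h2
    exact (List.prefix_append ['_','_'] r).isInfix
  | case4 a b r hab ih =>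
    intro h
    have h2 : ¬ (['_','_'] <:+: b :: r) := fun hin =>
      h (List.infix_cons_iff.mpr (Or.inr hin))
    simp [pvCollapse, hab, ih h2]

-- collapse is invariant under one replace pass — also with a '_' prepended
theorem pvPQ : ∀ (n : Nat) (cs : List Char), cs.length ≤ n →
    pvCollapse (pvRep cs) = pvCollapse cs ∧
    pvCollapse ('_' :: pvRep cs) = pvCollapse ('_' :: cs) := by
  intro n
  induction n with
  | zero =>
    intro cs h
    have : cs = [] := by cases cs <;> simp_all
    subst this
    exact ⟨rfl, rfl⟩
  | succ n ih =>
    intro cs hcs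
    match cs with
    | [] => exact ⟨rfl, rfl⟩
    | [a] => constructor <;> simp [pvRep]
    | a :: b :: r =>
      by_cases hab : a = '_' ∧ b = '_'
      · obtain ⟨h1, h2⟩ := hab
        subst h1; subst h2
        have hr := ih r (by simp at hcs; omega)
        have hrep : pvRep ('_'::'_'::r) = '_' :: pvRep r := by simp [pvRep]
        constructor
        · rw [hrep, pvCollapse_uu r]
          exact hr.2
        · rw [hrep, pvCollapse_uu (pvRep r), pvCollapse_uu ('_'::r), pvCollapse_uu r]
          exact hr.2
      · have hbr := ih (b :: r) (by simp at hcs ⊢; omega)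
        by_cases ha : a = '_'
        · subst ha
          have hb : b ≠ '_' := fun hb => hab ⟨rfl, hb⟩
          have hrep : pvRep ('_'::b::r) = '_' :: pvRep (b::r) := by simp [pvRep, hb]
          refine ⟨?_, ?_⟩
          · rw [hrep]
            exact hbr.2
          · rw [hrep, pvCollapse_uu (pvRep (b::r)), pvCollapse_uu (b::r)]
            exact hbr.2
        · have hrep : pvRep (a::b::r) = a :: pvRep (b::r) := by simp [pvRep, ha]
          have hcolu : ∀ x : List Char, pvCollapse ('_'::a::x) = '_' :: pvCollapse (a::x) := by
            intro x
            simp [pvCollapse, ha]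
          refine ⟨?_, ?_⟩
          · rw [hrep, pvCollapse_cons_ne ha, pvCollapse_cons_ne ha, hbr.1]
          · rw [hrep, hcolu, hcolu, pvCollapse_cons_ne ha, pvCollapse_cons_ne ha, hbr.1]

theorem pvCollapseLoop_eq_aux : ∀ (n : Nat) (cs : List Char), cs.length ≤ n →
    pvCollapseLoop cs = pvCollapse cs := by
  intro n
  induction n with
  | zero =>
    intro cs h
    have : cs = [] := by cases cs <;> simp_all
    subst this
    rw [pvCollapseLoop, dif_neg (by decide)]
    rfl
  | succ n ih =>
    intro cs hcs
    rw [pvCollapseLoop]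
    by_cases h : PySem.Chars.isIn ['_','_'] cs = true
    · rw [dif_pos h]
      have hlt := pvReplace_length_lt cs h
      rw [ih _ (by omega)]
      rw [pvReplace_eq_pvRep]
      exact (pvPQ cs.length cs le_rfl).1
    · rw [dif_neg h]
      exact (pvCollapse_of_not_infix cs
        (fun hin => h ((PySem.Chars.isIn_iff_infix _ _).mpr hin))).symm

-- B-side loop shapes
theorem pvRunsLoop_append : ∀ (cs : List Char) (runs : List (List Char)) (cur : List Char),
    pvRunsLoop cs runs cur = runs ++ pvRunsLoop cs [] cur := by
  intro cs
  induction cs with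
  | nil =>
    intro runs cur
    by_cases h : cur.isEmpty <;> simp [pvRunsLoop, h]
  | cons c rest ih =>
    intro runs cur
    by_cases h : PySem.Chars.isalnum c = true
    · simp only [pvRunsLoop, if_pos h]
      rw [ih runs, ih []]
    · by_cases hc : cur.isEmpty
      · simp only [pvRunsLoop, if_neg h, if_pos hc]
        rw [ih runs, ih []]
      · simp only [pvRunsLoop, if_neg h, if_neg hc, List.nil_append]
        rw [ih (runs ++ [cur]), ih [cur]]
        simp

theorem pvRunsLoop_ne_nil : ∀ (cs : List Char) (cur : List Char), cur ≠ [] →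
    pvRunsLoop cs [] cur ≠ [] := by
  intro cs
  induction cs with
  | nil =>
    intro cur hcur
    simp [pvRunsLoop, hcur]
  | cons c rest ih =>
    intro cur hcur
    have hce : cur.isEmpty = false := by simpa [List.isEmpty_iff] using hcur
    by_cases h : PySem.Chars.isalnum c = true
    · simp only [pvRunsLoop, if_pos h]
      exact ih (cur ++ [c]) (by simp)
    · simp only [pvRunsLoop, if_neg h, hce, Bool.false_eq_true, if_false]
      rw [pvRunsLoop_append]
      simp

theorem pvRunsLoop_map_pvF : ∀ (cs : List Char) (runs : List (List Char)) (cur : List Char),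
    pvRunsLoop (cs.map pvF) runs cur = pvRunsLoop cs runs cur := by
  intro cs
  induction cs with
  | nil => intro runs cur; rfl
  | cons c rest ih =>
    intro runs cur
    by_cases h : PySem.Chars.isalnum c = true
    · simp only [List.map_cons, pvRunsLoop, if_pos h, pvF_alnum h]
      exact ih _ _
    · by_cases hc : cur.isEmpty = true
      · simp only [List.map_cons, pvRunsLoop, isalnum_pvF]
        rw [if_neg h, if_neg h, if_pos hc, if_pos hc]
        exact ih _ _
      · simp only [List.map_cons, pvRunsLoop, isalnum_pvF]
        rw [if_neg h, if_neg h, if_neg hc, if_neg hc]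
        exact ih _ _

-- rstrip equations
theorem pvRstrip_cons_ne {a : Char} (h : a ≠ '_') (y : List Char) :
    pvRstrip (a :: y) = a :: pvRstrip y := by
  have hpa : pvP a = false := pvP_false h
  unfold pvRstrip
  rw [List.reverse_cons, List.dropWhile_append]
  by_cases he : (List.dropWhile pvP y.reverse).isEmpty = true
  · rw [if_pos he]
    simp only [List.dropWhile_cons, hpa, Bool.false_eq_true, if_false]
    simp [List.isEmpty_iff.mp he]
  · rw [if_neg he]
    simp

theorem pvRstrip_cons_underscore (y : List Char) :
    pvRstrip ('_' :: y) = if pvRstrip y = [] then [] else '_' :: pvRstrip y := by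
  unfold pvRstrip
  rw [List.reverse_cons, List.dropWhile_append]
  by_cases he : (List.dropWhile pvP y.reverse).isEmpty = true
  · rw [if_pos he]
    simp only [List.dropWhile_cons, pvP_underscore, if_true, List.dropWhile_nil,
      List.reverse_nil]
    rw [if_pos (by simp [List.isEmpty_iff.mp he])]
  · rw [if_neg he]
    rw [if_neg (by simp [List.isEmpty_iff] at he; simpa using he)]
    simp

-- The main invariant: G (a pending run joins the strip of the collapsed tail),
-- H (same with a '_' separator pending), M (the full strip equals the joined runs).
theorem pvGHM : ∀ (n : Nat) (t : List Char), t.length ≤ n → pvShape t →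
    ((∀ cur : List Char, cur ≠ [] →
        cur ++ pvRstrip (pvCollapse t) = PySem.Chars.join ['_'] (pvRunsLoop t [] cur)) ∧
     (pvRstrip (pvCollapse ('_' :: t)) =
        if pvRunsLoop t [] [] = [] then []
        else '_' :: PySem.Chars.join ['_'] (pvRunsLoop t [] [])) ∧
     (pvRstrip (List.dropWhile pvP (pvCollapse t)) =
        PySem.Chars.join ['_'] (pvRunsLoop t [] []))) := by
  intro n
  induction n with
  | zero =>
    intro t ht _
    have : t = [] := by cases t <;> simp_all
    subst this
    refine ⟨?_, by decide, by decide⟩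
    intro cur hcur
    have hce : cur.isEmpty = false := by simpa [List.isEmpty_iff] using hcur
    simp [pvCollapse, pvRstrip, pvRunsLoop, hce, PySem.Chars.join_singleton]
  | succ n ih =>
    intro t ht hshape
    match t with
    | [] =>
      refine ⟨?_, by decide, by decide⟩
      intro cur hcur
      have hce : cur.isEmpty = false := by simpa [List.isEmpty_iff] using hcur
      simp [pvCollapse, pvRstrip, pvRunsLoop, hce, PySem.Chars.join_singleton]
    | c :: r =>
      have hshr : pvShape r := fun x hx => hshape x (List.mem_cons_of_mem _ hx)
      have hr := ih r (by simp at ht; omega) hshr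
      rcases hshape c List.mem_cons_self with hcal | hcu
      · -- c alphanumeric
        have hcne : c ≠ '_' := fun h => by rw [h] at hcal; simp [isalnum_underscore] at hcal
        have hG : ∀ cur : List Char, cur ≠ [] →
            cur ++ pvRstrip (pvCollapse (c :: r)) =
            PySem.Chars.join ['_'] (pvRunsLoop (c :: r) [] cur) := by
          intro cur hcur
          rw [pvCollapse_cons_ne hcne, pvRstrip_cons_ne hcne]
          have he : cur ++ c :: pvRstrip (pvCollapse r) =
              (cur ++ [c]) ++ pvRstrip (pvCollapse r) := by simp
          rw [he, hr.1 (cur ++ [c]) (by simp)]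
          simp [pvRunsLoop, hcal]
        refine ⟨hG, ?_, ?_⟩
        · -- H
          have e1 : pvCollapse ('_' :: c :: r) = '_' :: pvCollapse (c :: r) := by
            simp [pvCollapse, hcne]
          rw [e1, pvCollapse_cons_ne hcne, pvRstrip_cons_underscore,
            pvRstrip_cons_ne hcne]
          rw [if_neg (by simp)]
          have hrs : pvRunsLoop (c :: r) [] [] = pvRunsLoop r [] [c] := by
            simp [pvRunsLoop, hcal]
          rw [hrs, if_neg (pvRunsLoop_ne_nil r [c] (by simp))]
          rw [← hr.1 [c] (by simp)]
          simp
        · -- M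
          have hpc : pvP c = false := pvP_false hcne
          rw [pvCollapse_cons_ne hcne]
          simp only [List.dropWhile_cons, hpc, Bool.false_eq_true, if_false]
          rw [pvRstrip_cons_ne hcne]
          have he : c :: pvRstrip (pvCollapse r) = [c] ++ pvRstrip (pvCollapse r) := rfl
          rw [he, hr.1 [c] (by simp)]
          simp [pvRunsLoop, hcal]
      · -- c = '_'
        subst hcu
        have hGu : ∀ cur : List Char, cur ≠ [] →
            cur ++ pvRstrip (pvCollapse ('_' :: r)) =
            PySem.Chars.join ['_'] (pvRunsLoop ('_' :: r) [] cur) := by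
          intro cur hcur
          have hce : cur.isEmpty = false := by simpa [List.isEmpty_iff] using hcur
          rw [hr.2.1]
          have hrl : pvRunsLoop ('_' :: r) [] cur = [cur] ++ pvRunsLoop r [] [] := by
            simp only [pvRunsLoop, isalnum_underscore, Bool.false_eq_true, if_false, hce]
            exact pvRunsLoop_append r [cur] []
          rw [hrl]
          cases hrs : pvRunsLoop r [] [] with
          | nil => simp [PySem.Chars.join_singleton]
          | cons s rs =>
            rw [if_neg (by simp)]
            have hj := PySem.Chars.join_cons_cons ['_'] cur s rs
            simp only [List.singleton_append, hj]
            simp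
        refine ⟨hGu, ?_, ?_⟩
        · -- H at '_'::r
          have hrl : pvRunsLoop ('_' :: r) [] [] = pvRunsLoop r [] [] := by
            simp [pvRunsLoop, isalnum_underscore]
          rw [pvCollapse_uu r, hrl, hr.2.1]
        · -- M at '_'::r
          have hrl : pvRunsLoop ('_' :: r) [] [] = pvRunsLoop r [] [] := by
            simp [pvRunsLoop, isalnum_underscore]
          rw [hrl]
          match r with
          | [] => decide
          | b :: r2 =>
            by_cases hb : b = '_'
            · subst hb
              have hrl2 : pvRunsLoop ('_' :: r2) [] [] = pvRunsLoop r2 [] [] := by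
                simp [pvRunsLoop, isalnum_underscore]
              have hm := (ih ('_' :: r2) (by simp at ht ⊢; omega) hshr).2.2
              rw [pvCollapse_uu r2, hm, hrl2]
            · have e1 : pvCollapse ('_' :: b :: r2) = '_' :: pvCollapse (b :: r2) := by
                simp [pvCollapse, hb]
              rw [e1]
              simp only [List.dropWhile_cons, pvP_underscore, if_true]
              exact (ih (b :: r2) (by simp at ht ⊢; omega) hshr).2.2

-- fold builds exactly the mapped list
theorem pvOut_eq_map (cs : List Char) :
    cs.foldl (fun acc ch =>
      acc ++ [if PySem.Chars.isalnum ch || ch == '_' then ch else '_']) [] = cs.map pvF := by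
  simpa [pvF] using PySem.List.foldl_append_singleton_eq_map pvF cs []

-- ===== VERDICT (by name: the statement is the Claim_ definition above) =====
theorem sanitize_token_spec : Claim_equal_sanitize_token := by
  intro s _
  simp only [Spec_sanitize_token, sanitize_token, sanitize_token_alt]
  rw [pvOut_eq_map]
  congr 1
  rw [pvCollapseLoop_eq_aux (s.toList.map pvF).length _ le_rfl, pvStripChars_eq]
  rw [(pvGHM (s.toList.map pvF).length _ le_rfl (pvShape_map_pvF s.toList)).2.2]
  rw [pvRunsLoop_map_pvF]
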